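-- pv_equiv track=rewrite | github.com/CTingy/DSA-coursera | graph/week1_graph_decomposition1/reachability.py | reachability
-- ===== SOURCE A (Python) =====
-- def reachability(node1, node2, edges, visited_edges):
--     nodes = edges.get(node1)
--     if not nodes:
--         return 0
--     res = 0
--     for node in nodes:
--         visited_edge1, visited_edge2 = (node1, node), (node2, node)
--         if visited_edge1 in visited_edges or visited_edge2 in visited_edges:
--             continue
--         visited_edges.append(visited_edge1)
--         visited_edges.append(visited_edge2)
--         if node == node2:
--             res += 1
--         else:
--             res += reachability(node, node2, edges, visited_edges)
--     return res
-- ===== SOURCE B (Python) =====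
-- def reachability(node1, node2, edges, visited_edges):
--     nodes = edges.get(node1)
--     if not nodes:
--         return 0
--     total = 0
--     stack = [(node1, iter(nodes))]
--     while stack:
--         src, it = stack[-1]
--         node = next(it, None)
--         if node is None:
--             stack.pop()
--             continue
--         e1, e2 = (src, node), (node2, node)
--         if e1 in visited_edges or e2 in visited_edges:
--             continue
--         visited_edges.append(e1)
--         visited_edges.append(e2)
--         if node == node2:
--             total += 1
--         else:
--             stack.append((node, iter(edges.get(node) or [])))
--     return total
-- ===== Notes on version B (the rewrite author's own statement) =====
-- stated objective: alternative
-- what changed: Replaces A's recursive DFS with an iterative explicit-stack DFS: frames of (source node, neighbor iterator) with a running total, visiting edges and appending to visited_edges in exactly A's order.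
import Mathlib
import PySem

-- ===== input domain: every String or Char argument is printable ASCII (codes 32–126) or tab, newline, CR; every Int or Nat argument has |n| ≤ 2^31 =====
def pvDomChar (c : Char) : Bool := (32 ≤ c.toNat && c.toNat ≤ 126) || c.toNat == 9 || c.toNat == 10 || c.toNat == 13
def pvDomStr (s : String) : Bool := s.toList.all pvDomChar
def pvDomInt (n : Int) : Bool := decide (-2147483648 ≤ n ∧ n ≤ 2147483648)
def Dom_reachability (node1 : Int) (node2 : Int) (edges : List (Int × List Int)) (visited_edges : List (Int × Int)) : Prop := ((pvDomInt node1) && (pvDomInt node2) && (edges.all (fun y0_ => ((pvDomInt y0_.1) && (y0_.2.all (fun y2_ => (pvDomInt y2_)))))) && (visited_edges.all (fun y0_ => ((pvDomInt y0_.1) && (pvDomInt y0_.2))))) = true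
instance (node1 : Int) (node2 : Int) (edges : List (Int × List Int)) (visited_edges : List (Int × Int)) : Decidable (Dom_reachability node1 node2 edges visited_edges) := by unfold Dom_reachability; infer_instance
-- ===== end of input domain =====

-- ===== PORT A =====
-- B changes only the decomposition (explicit-stack DFS instead of recursion); return values proved
-- equal on all inputs. Both Pythons mutate visited_edges in place identically; the equivalence here
-- is about the return value.
-- dict.get(k): first-match lookup on the association list, [] for a missing key ('if not nodes'
-- treats None and [] alike, so the getD [] collapse is exact).
def pvNbrs (edges : List (Int × List Int)) (n : Int) : List Int :=
  ((edges.find? (fun p => p.1 == n)).map Prod.snd).getD []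

-- total neighbour count + 1; fuel bound for the DFS depth (a totality guard only: each descent
-- appends a fresh pair (src, node) drawn from the edge list, so the depth never reaches it)
def pvFuel (edges : List (Int × List Int)) : Nat :=
  (edges.map (fun p => p.2.length)).sum + 1

-- A, transliterated: the for-loop is pvLoopA (structural on the neighbour list), the recursive call
-- is pvReachA with fuel-1; the mutated visited_edges list is threaded through as state.
-- none = fuel exhausted (never happens for pvFuel; the guard only makes the recursion total).
mutual
def pvLoopA (node2 : Int) (edges : List (Int × List Int)) :
    Nat → Int → List Int → List (Int × Int) → Option (Int × List (Int × Int))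
  | _, _, [], ve => some (0, ve)
  | fuel, node1, node :: rest, ve =>
    if (node1, node) ∈ ve ∨ (node2, node) ∈ ve then
      pvLoopA node2 edges fuel node1 rest ve
    else
      let ve' := ve ++ [(node1, node), (node2, node)]
      if node = node2 then
        (pvLoopA node2 edges fuel node1 rest ve').map (fun p => (1 + p.1, p.2))
      else
        match fuel with
        | 0 => none
        | f + 1 =>
          match pvReachA node2 edges f node ve' with
          | none => none
          | some (r, ve'') =>
            (pvLoopA node2 edges (f + 1) node1 rest ve'').map (fun p => (r + p.1, p.2))
termination_by fuel _ ns _ => (fuel, ns.length + 1)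

def pvReachA (node2 : Int) (edges : List (Int × List Int)) (fuel : Nat) (node1 : Int)
    (ve : List (Int × Int)) : Option (Int × List (Int × Int)) :=
  let nodes := pvNbrs edges node1
  if nodes = [] then some (0, ve) else pvLoopA node2 edges fuel node1 nodes ve
termination_by (fuel + 1, 0)
end

def reachability (node1 : Int) (node2 : Int) (edges : List (Int × List Int))
    (visited_edges : List (Int × Int)) : Int :=
  ((pvReachA node2 edges (pvFuel edges) node1 visited_edges).map Prod.fst).getD 0

-- ===== PORT B =====
-- needed by pvRunB's termination measure: a neighbour list is never longer than the whole edge list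
theorem pvNbrs_len_le (edges : List (Int × List Int)) (n : Int) :
    (pvNbrs edges n).length ≤ (edges.map (fun p => p.2.length)).sum := by
  induction edges with
  | nil => simp [pvNbrs]
  | cons e rest ih =>
    by_cases h : e.1 == n
    · simp [pvNbrs, List.find?, h]
    · simp only [pvNbrs, List.find?, h, List.map_cons, List.sum_cons]
      simp only [pvNbrs] at ih
      omega

theorem pvPow_pos (E e : Nat) : 0 < (E + 2) ^ e := Nat.pow_pos (by omega)

-- the push step strictly shrinks the weighted stack measure
theorem pvPush_lt (E g Lc L S : Nat) (h : Lc ≤ E) :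
    (Lc + 1) * (E + 2) ^ g + ((L + 1) * (E + 2) ^ (g + 1) + S) <
      (L + 1 + 1) * (E + 2) ^ (g + 1) + S := by
  have h1 : (Lc + 1) * (E + 2) ^ g < (E + 2) ^ (g + 1) := by
    calc (Lc + 1) * (E + 2) ^ g ≤ (E + 1) * (E + 2) ^ g :=
          Nat.mul_le_mul_right _ (by omega)
      _ < (E + 2) * (E + 2) ^ g :=
          Nat.mul_lt_mul_of_lt_of_le (by omega) (le_refl _) (pvPow_pos E g)
      _ = (E + 2) ^ (g + 1) := by rw [pow_succ]; ring
  nlinarith [pvPow_pos E (g + 1)]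

-- B's while-loop over the explicit stack; a frame is (src, remaining neighbours, frame fuel).
-- Frame fuel mirrors A's depth guard: a pushed child frame carries fuel-1 (none = exhausted, never
-- reached for pvFuel). Terminates by the weighted measure below even without the fuel running out.
def pvRunB (node2 : Int) (edges : List (Int × List Int)) :
    List (Int × List Int × Nat) → List (Int × Int) → Int → Option Int
  | [], _, tot => some tot
  | (_, [], _) :: frames, ve, tot => pvRunB node2 edges frames ve tot
  | (src, node :: rest, f) :: frames, ve, tot =>
    if (src, node) ∈ ve ∨ (node2, node) ∈ ve then
      pvRunB node2 edges ((src, rest, f) :: frames) ve tot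
    else
      let ve' := ve ++ [(src, node), (node2, node)]
      if node = node2 then
        pvRunB node2 edges ((src, rest, f) :: frames) ve' (tot + 1)
      else
        match f with
        | 0 => none
        | g + 1 =>
          pvRunB node2 edges ((node, pvNbrs edges node, g) :: (src, rest, g + 1) :: frames) ve' tot
termination_by stack _ _ =>
  (stack.map (fun fr => (fr.2.1.length + 1) *
    ((edges.map (fun p => p.2.length)).sum + 2) ^ fr.2.2)).sum
decreasing_by
  · simp only [List.map_cons, List.sum_cons, List.length_nil]
    nlinarith [pvPow_pos (edges.map (fun p => p.2.length)).sum ‹Nat›]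
  · simp only [List.map_cons, List.sum_cons, List.length_cons]
    nlinarith [pvPow_pos (edges.map (fun p => p.2.length)).sum f]
  · simp only [List.map_cons, List.sum_cons, List.length_cons]
    nlinarith [pvPow_pos (edges.map (fun p => p.2.length)).sum f]
  · simp only [List.map_cons, List.sum_cons, List.length_cons]
    exact pvPush_lt _ _ _ _ _ (pvNbrs_len_le edges node)

def reachability_alt (node1 : Int) (node2 : Int) (edges : List (Int × List Int))
    (visited_edges : List (Int × Int)) : Int :=
  let nodes := pvNbrs edges node1
  if nodes = [] then 0
  else (pvRunB node2 edges [(node1, nodes, pvFuel edges)] visited_edges 0).getD 0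

-- ===== PRECONDITION & SPEC =====
def Spec_reachability (node1 : Int) (node2 : Int) (edges : List (Int × List Int)) (visited_edges : List (Int × Int)) (out : Int) : Prop := out = reachability_alt node1 node2 edges visited_edges
instance (node1 : Int) (node2 : Int) (edges : List (Int × List Int)) (visited_edges : List (Int × Int)) (out : Int) : Decidable (Spec_reachability node1 node2 edges visited_edges out) := by unfold Spec_reachability; infer_instance

-- ===== CLAIM (what is proved, stated in full; the proofs are below) =====
def Claim_equal_reachability : Prop := ∀ (node1 : Int) (node2 : Int) (edges : List (Int × List Int)) (visited_edges : List (Int × Int)), Dom_reachability node1 node2 edges visited_edges → Spec_reachability node1 node2 edges visited_edges (reachability node1 node2 edges visited_edges)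

-- ===== LEMMAS AND PROOFS =====

-- entering a node = running its neighbour loop (an empty loop already returns (0, ve))
theorem pvReachA_eq_loop (node2 : Int) (edges : List (Int × List Int)) (fuel : Nat)
    (n : Int) (ve : List (Int × Int)) :
    pvReachA node2 edges fuel n ve = pvLoopA node2 edges fuel n (pvNbrs edges n) ve := by
  rw [pvReachA]
  by_cases h : pvNbrs edges n = []
  · rw [if_pos h, h, pvLoopA]
  · rw [if_neg h]

-- the stack machine simulates A's recursion frame by frame
theorem pvSim (node2 : Int) (edges : List (Int × List Int)) (f : Nat) :
    ∀ (ns : List Int) (src : Int) (ve : List (Int × Int)) (tot : Int)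
      (frames : List (Int × List Int × Nat)),
    pvRunB node2 edges ((src, ns, f) :: frames) ve tot =
      match pvLoopA node2 edges f src ns ve with
      | none => none
      | some (r, ve') => pvRunB node2 edges frames ve' (tot + r) := by
  induction f using Nat.strong_induction_on with
  | _ f IH =>
    intro ns
    induction ns with
    | nil =>
      intro src ve tot frames
      simp [pvRunB, pvLoopA]
    | cons node rest ih =>
      intro src ve tot frames
      by_cases hv : (src, node) ∈ ve ∨ (node2, node) ∈ ve
      · rw [pvRunB, pvLoopA, if_pos hv, if_pos hv, ih]
      · by_cases hn : node = node2
        · rw [pvRunB, pvLoopA, if_neg hv, if_neg hv, if_pos hn, if_pos hn, ih]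
          cases hL : pvLoopA node2 edges f src rest (ve ++ [(src, node), (node2, node)]) with
          | none => rfl
          | some p =>
            obtain ⟨r, ve2⟩ := p
            simp only [Option.map_some]
            have : tot + 1 + r = tot + (1 + r) := by ring
            rw [this]
        · cases f with
          | zero =>
            rw [pvRunB, pvLoopA, if_neg hv, if_neg hv, if_neg hn, if_neg hn]
          | succ g =>
            rw [pvRunB, pvLoopA, if_neg hv, if_neg hv, if_neg hn, if_neg hn]
            simp only [Nat.add_one]
            rw [IH g (Nat.lt_succ_self g), pvReachA_eq_loop]
            cases hL : pvLoopA node2 edges g node (pvNbrs edges node)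
                (ve ++ [(src, node), (node2, node)]) with
            | none => rfl
            | some p =>
              obtain ⟨r, ve2⟩ := p
              simp only [Nat.succ_eq_add_one]
              rw [ih]
              cases hL2 : pvLoopA node2 edges (g + 1) src rest ve2 with
              | none => rfl
              | some q =>
                obtain ⟨r2, ve3⟩ := q
                simp only [Option.map_some]
                have : tot + r + r2 = tot + (r + r2) := by ring
                rw [this]

-- ===== VERDICT (by name: the statement is the Claim_ definition above) =====
theorem reachability_spec : Claim_equal_reachability := by
  intro node1 node2 edges visited_edges _
  unfold Spec_reachability reachability reachability_alt
  by_cases h : pvNbrs edges node1 = []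
  · rw [pvReachA, if_pos h, if_pos h]
    rfl
  · rw [pvReachA_eq_loop, if_neg h, pvSim]
    cases hL : pvLoopA node2 edges (pvFuel edges) node1 (pvNbrs edges node1) visited_edges with
    | none => rfl
    | some p =>
      show p.1 = (pvRunB node2 edges [] p.2 (0 + p.1)).getD 0
      rw [pvRunB]
      simp
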